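-- pv_equiv track=rewrite | github.com/fortvivlan/classificator_formal_quotes | tfisforiginal.py | vectors
-- ===== SOURCE A (Python) =====
-- def vectors(data, allwords):
--     vec = {}
--     for key in data:
--         vec[key] = dict.fromkeys(allwords, 0)
--         for token in data[key]:
--             if token in vec[key]:
--                 vec[key][token] += 1
--     for key in vec:
--         vec[key] = [value for token, value in sorted(vec[key].items())]
--     return vec
-- ===== SOURCE B (Python) =====
-- def vectors(data, allwords):
--     order = sorted(set(allwords))
--     return {key: [tokens.count(w) for w in order] for key, tokens in data.items()}
-- ===== Notes on version B (the rewrite author's own statement) =====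
-- stated objective: simpler
-- what changed: B inverts the traversal: it sorts the unique vocabulary once and, for each key, computes each row entry directly as tokens.count(word) per vocabulary word, eliminating A's per-key dict of counters rebuilt from all words and its per-key final sort.
import Mathlib
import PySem

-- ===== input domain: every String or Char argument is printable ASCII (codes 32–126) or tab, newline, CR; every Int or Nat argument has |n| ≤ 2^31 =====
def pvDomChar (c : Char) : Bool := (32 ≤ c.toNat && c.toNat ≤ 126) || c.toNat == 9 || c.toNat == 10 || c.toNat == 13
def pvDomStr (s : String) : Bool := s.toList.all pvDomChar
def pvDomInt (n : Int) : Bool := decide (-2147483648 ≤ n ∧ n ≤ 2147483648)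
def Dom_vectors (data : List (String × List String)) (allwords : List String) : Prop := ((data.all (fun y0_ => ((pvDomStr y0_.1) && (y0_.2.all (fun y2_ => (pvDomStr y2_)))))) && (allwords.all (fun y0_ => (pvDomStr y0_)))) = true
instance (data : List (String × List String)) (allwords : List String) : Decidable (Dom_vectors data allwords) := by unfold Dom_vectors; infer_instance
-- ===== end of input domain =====

-- B sorts the unique vocabulary once and computes each row entry directly as tokens.count(word)
-- per vocabulary word, instead of A's per-key counter dict rebuilt from all words and sorted per
-- key; objective: simpler (shorter, no per-key dict or sort), not claimed faster.

-- ===== PORT A =====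
-- 'data' is a Python dict: the assoc-list argument is read as PySem.Dict.ofList data (insertion
-- order, a later duplicate key overwrites).  The final 'for key in vec: vec[key] = [...]' rewrites
-- each value in place, i.e. maps over vec's items; the returned dict is its items list.
def vectors (data : List (String × List String)) (allwords : List String) : List (String × List Int) :=
  let d := PySem.Dict.ofList data
  let vec : PySem.Dict String (PySem.Dict String Int) :=
    d.items.foldl
      (fun vec kv =>
        -- vec[key] = dict.fromkeys(allwords, 0)
        let base : PySem.Dict String Int :=
          allwords.foldl (fun m w => m.insert w (0 : Int)) PySem.Dict.empty
        -- for token in data[key]: if token in vec[key]: vec[key][token] += 1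
        let cnt := kv.2.foldl (fun m t => if m.contains t then m.modify t 0 (· + 1) else m) base
        vec.insert kv.1 cnt)
      PySem.Dict.empty
  vec.items.map (fun kv => (kv.1, (PySem.List.sorted2 kv.2.items Prod.fst Prod.snd).map Prod.snd))

-- ===== PORT B =====
-- order = sorted(set(allwords)); row = [tokens.count(w) for w in order], per key of data.
def vectors_alt (data : List (String × List String)) (allwords : List String) : List (String × List Int) :=
  let order := PySem.List.sorted (PySem.Set.ofList allwords) (fun x => x)
  (PySem.Dict.ofList data).items.map
    (fun kv => (kv.1, order.map (fun w => (PySem.List.count kv.2 w : Int))))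

-- ===== PRECONDITION & SPEC =====
def Spec_vectors (data : List (String × List String)) (allwords : List String) (out : List (String × List Int)) : Prop := out = vectors_alt data allwords
instance (data : List (String × List String)) (allwords : List String) (out : List (String × List Int)) : Decidable (Spec_vectors data allwords out) := by unfold Spec_vectors; infer_instance

-- ===== CLAIM (what is proved, stated in full; the proofs are below) =====
def Claim_equal_vectors : Prop := ∀ (data : List (String × List String)) (allwords : List String), Dom_vectors data allwords → Spec_vectors data allwords (vectors data allwords)

-- ===== LEMMAS AND PROOFS =====

-- Named copies of A's per-key row computation (proof-only helpers).
def Astep (m : PySem.Dict String Int) (t : String) : PySem.Dict String Int :=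
  if m.contains t then m.modify t 0 (· + 1) else m

def AbaseOf (allwords : List String) : PySem.Dict String Int :=
  allwords.foldl (fun m w => m.insert w (0 : Int)) PySem.Dict.empty

def AcntOf (allwords tokens : List String) : PySem.Dict String Int :=
  tokens.foldl Astep (AbaseOf allwords)

def ArowOf (allwords tokens : List String) : List Int :=
  (PySem.List.sorted2 (AcntOf allwords tokens).items Prod.fst Prod.snd).map Prod.snd

def BorderOf (allwords : List String) : List String :=
  PySem.List.sorted (PySem.Set.ofList allwords) (fun x => x)

lemma A_as_map (data : List (String × List String)) (allwords : List String) :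
    vectors data allwords
      = (PySem.Dict.ofList data).items.map (fun kv => (kv.1, ArowOf allwords kv.2)) := by
  simp only [vectors]
  have hnd : ((PySem.Dict.ofList data).items.map Prod.fst).Nodup := by
    have := PySem.Dict.nodup_keys_ofList data
    simpa [PySem.Dict.keys] using this
  have hfun : (fun (vec : PySem.Dict String (PySem.Dict String Int)) (kv : String × List String) =>
      vec.insert kv.1
        (kv.2.foldl (fun m t => if m.contains t then m.modify t 0 (· + 1) else m)
          (allwords.foldl (fun m w => m.insert w (0 : Int)) PySem.Dict.empty)))
      = (fun vec kv => vec.insert kv.1 (AcntOf allwords kv.2)) := by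
    funext vec kv; rfl
  rw [hfun]
  rw [PySem.Dict.items_foldl_insert_fresh (PySem.Dict.ofList data).items Prod.fst
        (fun kv => AcntOf allwords kv.2) PySem.Dict.empty
        (fun a _ => PySem.Dict.contains_empty a.1) hnd]
  have hemp : PySem.Dict.empty.items = ([] : List (String × PySem.Dict String Int)) := rfl
  rw [hemp]
  simp [List.map_map, Function.comp, ArowOf]

lemma insertBy_congr {α : Type} (b b' : α → α → Bool) (x : α) (ys : List α)
    (h : ∀ y ∈ ys, b x y = b' x y) :
    PySem.List.insertBy b x ys = PySem.List.insertBy b' x ys := by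
  induction ys with
  | nil => rfl
  | cons y ys ih =>
    have hy := h y (by simp)
    simp only [PySem.List.insertBy, hy]
    split
    · rfl
    · simp only [List.cons.injEq, true_and]
      exact ih (fun z hz => h z (by simp [hz]))
lemma foldl_insertBy_congr {α : Type} (b b' : α → α → Bool) (xs : List α)
    (hagree : ∀ a ∈ xs, ∀ c ∈ xs, b a c = b' a c) :
    ∀ (l acc : List α), (∀ x ∈ l, x ∈ xs) → (∀ y ∈ acc, y ∈ xs) →
    l.foldl (fun acc x => PySem.List.insertBy b x acc) acc
      = l.foldl (fun acc x => PySem.List.insertBy b' x acc) acc := by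
  intro l
  induction l with
  | nil => intro acc _ _; rfl
  | cons x l ih =>
    intro acc hl hacc
    have hx : x ∈ xs := hl x (by simp)
    simp only [List.foldl_cons]
    rw [insertBy_congr b b' x acc (fun y hy => hagree x hx y (hacc y hy))]
    refine ih _ (fun z hz => hl z (by simp [hz])) (fun y hy => ?_)
    rcases (PySem.List.mem_insertBy b' x y acc).mp hy with h | h
    · exact h ▸ hx
    · exact hacc y h
lemma sorted2_fst (xs : List (String × Int))
    (hinj : ∀ a ∈ xs, ∀ c ∈ xs, a.1 = c.1 → a = c) :
    PySem.List.sorted2 xs Prod.fst Prod.snd = PySem.List.sorted xs Prod.fst := by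
  rw [PySem.List.sorted_eq_foldl_insertBy]
  show xs.foldl (fun acc x => PySem.List.insertBy _ x acc) [] = _
  refine foldl_insertBy_congr _ _ xs (fun a ha c hc => ?_) xs [] (fun x hx => hx) (by simp)
  by_cases h1 : a.1 < c.1
  · simp [h1]
  · by_cases h2 : c.1 < a.1
    · simp [h1, h2]
    · have : a = c := hinj a ha c hc (le_antisymm (not_lt.mp h2) (not_lt.mp h1))
      subst this
      simp
lemma base_getD (l : List String) : ∀ (m : PySem.Dict String Int), (∀ w, m.getD w 0 = 0) → ∀ w,
    (l.foldl (fun m w => m.insert w (0 : Int)) m).getD w 0 = 0 := by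
  induction l with
  | nil => intro m h w; exact h w
  | cons a l ih =>
    intro m h w
    refine ih _ (fun v => ?_) w
    rw [PySem.Dict.getD_insert]
    split <;> simp [h]
lemma base_keys (allwords : List String) :
    (AbaseOf allwords).keys = PySem.Set.ofList allwords := by
  unfold AbaseOf
  rw [PySem.Dict.keys_foldl_insert allwords (fun _ _ => (0:Int)) PySem.Dict.empty]
  rw [PySem.Dict.keys_empty, PySem.Set.ofList_eq_foldl]
  rfl
lemma cnt_keys (l : List String) : ∀ m, (l.foldl Astep m).keys = m.keys := by
  induction l with
  | nil => intro m; rfl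
  | cons a l ih =>
    intro m
    simp only [List.foldl_cons, ih]
    unfold Astep
    split
    · rw [PySem.Dict.keys_modify, PySem.Dict.keys_insert_of_contains _ _ (by assumption)]
    · rfl
lemma cnt_getD (l : List String) : ∀ (m : PySem.Dict String Int) (w : String),
    (l.foldl Astep m).getD w 0
      = m.getD w 0 + (if m.contains w = true then (l.count w : Int) else 0) := by
  induction l with
  | nil => intro m w; simp
  | cons a l ih =>
    intro m w
    simp only [List.foldl_cons]
    rw [ih]
    unfold Astep
    by_cases ha : m.contains a = true
    · simp only [ha, if_true]
      rw [PySem.Dict.getD_modify]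
      have hc : (m.modify a 0 (· + 1)).contains w = (w == a || m.contains w) :=
        PySem.Dict.contains_modify m a w 0 (· + 1)
      rw [hc]
      by_cases hw : w = a
      · subst hw
        simp [ha]; ring
      · simp only [hw]
        by_cases hcw : m.contains w = true
        · simp [hcw, Ne.symm hw]
        · simp [hcw]; exact fun h => absurd h hw
    · simp only [ha]
      by_cases hcw : m.contains w = true
      · have hwa : ¬ (a = w) := fun h => ha (h ▸ hcw)
        simp [hcw, hwa]
      · simp [hcw]
lemma Acnt_items (allwords tokens : List String) :
    (AcntOf allwords tokens).items
      = (PySem.Set.ofList allwords).map (fun w => (w, (tokens.count w : Int))) := by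
  have hkeys : (AcntOf allwords tokens).keys = PySem.Set.ofList allwords := by
    rw [AcntOf, cnt_keys, base_keys]
  have hnd : (AcntOf allwords tokens).keys.Nodup := by
    rw [hkeys]; exact PySem.Set.nodup_ofList allwords
  rw [PySem.Dict.items_eq_map_keys _ hnd 0, hkeys]
  refine List.map_congr_left (fun w hw => ?_)
  have hc : (AbaseOf allwords).contains w = true := by
    rw [PySem.Dict.contains_iff_mem_keys, base_keys]; exact hw
  have hb : (AbaseOf allwords).getD w 0 = 0 :=
    base_getD allwords PySem.Dict.empty (fun v => PySem.Dict.getD_empty v 0) w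
  rw [AcntOf, cnt_getD, hb, if_pos hc, zero_add]

lemma Arow_eq (allwords tokens : List String) :
    ArowOf allwords tokens = (BorderOf allwords).map (fun w => (tokens.count w : Int)) := by
  unfold ArowOf
  rw [Acnt_items]
  rw [sorted2_fst _ (fun a ha c hc h1 => by
    obtain ⟨w1, _, rfl⟩ := List.mem_map.mp ha
    obtain ⟨w2, _, rfl⟩ := List.mem_map.mp hc
    simp only at h1
    rw [h1])]
  have hsort : PySem.List.sorted ((PySem.Set.ofList allwords).map (fun w => (w, (tokens.count w : Int)))) Prod.fst
      = (BorderOf allwords).map (fun w => (w, (tokens.count w : Int))) := by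
    refine PySem.List.sorted_eq_of_perm_of_pairwise_lt _ _ _ ?_ ?_
    · exact List.Perm.map _ (PySem.List.sorted_perm (PySem.Set.ofList allwords) (fun x => x) false)
    · have hpw : (BorderOf allwords).Pairwise (· < ·) :=
        PySem.List.sorted_ofList_pairwise_lt (κ := String) allwords
      exact hpw.map _ (fun a b h => h)
  rw [hsort, List.map_map]
  rfl

-- ===== VERDICT (by name: the statement is the Claim_ definition above) =====
theorem vectors_spec : Claim_equal_vectors := by
  intro data allwords _hdom
  show vectors data allwords = vectors_alt data allwords
  rw [A_as_map]
  simp only [vectors_alt]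
  refine List.map_congr_left (fun kv _ => ?_)
  rw [Arow_eq]
  simp [BorderOf, PySem.List.count_eq]
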